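-- pv_equiv track=rewrite | github.com/2018hsridhar/LEETCODE_REPO_2 | leetcode_840.py | getBottomRight
-- ===== SOURCE A (Python) =====
-- from typing import List
--
-- def getBottomRight(grid: List[List[int]]) -> List[List[int]]:
--     m = len(grid)
--     n = len(grid[0])
--     brSums = [[grid[i][j] for j in range(n)] for i in range(m)]
--     for i in range(1,m):
--         for j in range(1,n):
--             brSums[i][j] += brSums[i-1][j-1]
--     return brSums
-- ===== SOURCE B (Python) =====
-- from typing import List
--
-- def getBottomRight(grid: List[List[int]]) -> List[List[int]]:
--     m, n = len(grid), len(grid[0])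
--     return [[sum(grid[i - k][j - k] for k in range(min(i, j) + 1))
--              for j in range(n)]
--             for i in range(m)]
-- ===== Notes on version B (the rewrite author's own statement) =====
-- stated objective: simpler
-- what changed: Replaces A's build-then-mutate DP (in-place double index loop reading result[i-1][j-1]) by a direct per-cell closed form: each cell is the sum of its down-right diagonal prefix, computed independently in one nested comprehension.
import Mathlib
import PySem

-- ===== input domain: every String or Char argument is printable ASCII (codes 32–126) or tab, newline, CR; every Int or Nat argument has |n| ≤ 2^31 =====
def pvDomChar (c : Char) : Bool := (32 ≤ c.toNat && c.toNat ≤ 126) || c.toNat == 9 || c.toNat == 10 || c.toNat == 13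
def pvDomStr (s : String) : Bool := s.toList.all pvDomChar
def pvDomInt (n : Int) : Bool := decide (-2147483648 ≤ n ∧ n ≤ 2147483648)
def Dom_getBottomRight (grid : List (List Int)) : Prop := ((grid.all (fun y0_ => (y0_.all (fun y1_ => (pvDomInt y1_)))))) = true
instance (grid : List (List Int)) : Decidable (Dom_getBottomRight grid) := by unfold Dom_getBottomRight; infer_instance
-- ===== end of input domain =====

-- B replaces A's in-place diagonal DP by an independent per-cell diagonal-prefix-sum closed form (simpler; not faster).


-- ===== PORT A =====
def pvStepA (bs : List (List Int)) (i j : Int) : List (List Int) :=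
  PySem.List.pySetD bs i
    (PySem.List.pySetD (PySem.List.pyGetD bs i []) j
      (PySem.List.pyGetD (PySem.List.pyGetD bs i []) j 0
        + PySem.List.pyGetD (PySem.List.pyGetD bs (i-1) []) (j-1) 0))
def pvRowA (bs : List (List Int)) (i n : Int) : List (List Int) :=
  (PySem.List.pyRange 1 n 1).foldl (fun b j => pvStepA b i j) bs

def getBottomRight (grid : List (List Int)) : List (List Int) :=
  let m : Int := grid.length
  let n : Int := (PySem.List.pyGetD grid 0 []).length
  let brSums := (PySem.List.pyRange 0 m 1).map (fun i =>
    (PySem.List.pyRange 0 n 1).map (fun j =>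
      PySem.List.pyGetD (PySem.List.pyGetD grid i []) j 0))
  (PySem.List.pyRange 1 m 1).foldl (fun bs i => pvRowA bs i n) brSums

-- ===== PORT B =====
-- sum(grid[i-k][j-k] for k in range(min(i,j)+1))
def getBottomRight_alt (grid : List (List Int)) : List (List Int) :=
  let m : Int := grid.length
  let n : Int := (PySem.List.pyGetD grid 0 []).length
  (PySem.List.pyRange 0 m 1).map (fun i =>
    (PySem.List.pyRange 0 n 1).map (fun j =>
      (PySem.List.pyRange 0 (min i j + 1) 1).foldl (fun s k =>
        s + PySem.List.pyGetD (PySem.List.pyGetD grid (i-k) []) (j-k) 0) 0))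

-- ===== PRECONDITION & SPEC =====
-- Pre_ excludes exactly the inputs on which the Python A raises IndexError: the empty grid
-- (grid[0]) and grids with a row shorter than the first row (grid[i][j] for j < n).
def Pre_getBottomRight (grid : List (List Int)) : Prop :=
  grid ≠ [] ∧ ∀ row ∈ grid, (grid.headD []).length ≤ row.length
instance (grid : List (List Int)) : Decidable (Pre_getBottomRight grid) := by
  unfold Pre_getBottomRight; infer_instance
def pvWitness_getBottomRight : List (List Int) := [[1, 2], [3, 4]]
def Spec_getBottomRight (grid : List (List Int)) (out : List (List Int)) : Prop := out = getBottomRight_alt grid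
instance (grid : List (List Int)) (out : List (List Int)) : Decidable (Spec_getBottomRight grid out) := by unfold Spec_getBottomRight; infer_instance

-- ===== CLAIM (what is proved, stated in full; the proofs are below) =====
def Claim_equal_getBottomRight : Prop := ∀ (grid : List (List Int)), Dom_getBottomRight grid → Pre_getBottomRight grid → Spec_getBottomRight grid (getBottomRight grid)

-- ===== LEMMAS AND PROOFS =====
-- The two ports are in fact equal on EVERY grid; the proof goes through the common
-- cellwise value pvS (the diagonal prefix sum), via a loop invariant for A's folds.

def pvRowUpd (prev cur : List Int) (t : Nat) : List Int :=
  (List.range cur.length).map (fun j =>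
    if 1 ≤ j ∧ j ≤ t then cur.getD j 0 + prev.getD (j-1) 0 else cur.getD j 0)

theorem pvRowUpd_length (prev cur : List Int) (t : Nat) :
    (pvRowUpd prev cur t).length = cur.length := by simp [pvRowUpd]

theorem pvRowUpd_getElem (prev cur : List Int) (t j : Nat) (hj : j < cur.length) :
    (pvRowUpd prev cur t)[j]'(by simp [pvRowUpd_length, hj]) =
      if 1 ≤ j ∧ j ≤ t then cur.getD j 0 + prev.getD (j-1) 0 else cur.getD j 0 := by
  simp [pvRowUpd]

theorem pvRowUpd_getD (prev cur : List Int) (t j : Nat) (hj : j < cur.length) :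
    (pvRowUpd prev cur t).getD j 0 =
      if 1 ≤ j ∧ j ≤ t then cur.getD j 0 + prev.getD (j-1) 0 else cur.getD j 0 := by
  have h : j < (pvRowUpd prev cur t).length := by simp [pvRowUpd_length, hj]
  rw [List.getD_eq_getElem?_getD, List.getElem?_eq_getElem h, Option.getD_some, pvRowUpd_getElem prev cur t j hj]

theorem pvRowUpd_zero (prev cur : List Int) : pvRowUpd prev cur 0 = cur := by
  apply List.ext_getElem
  · simp [pvRowUpd_length]
  · intro j h1 h2
    rw [pvRowUpd_getElem prev cur 0 j h2]
    simp [List.getD_eq_getElem?_getD, List.getElem?_eq_getElem h2]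
    omega

theorem pvRowUpd_set (prev cur : List Int) (t : Nat) (ht : 1 ≤ t) :
    (pvRowUpd prev cur (t-1)).set t ((pvRowUpd prev cur (t-1)).getD t 0 + prev.getD (t-1) 0)
      = pvRowUpd prev cur t := by
  by_cases hlen : t < cur.length
  · apply List.ext_getElem
    · simp [pvRowUpd_length]
    · intro j h1 h2
      have hj : j < cur.length := by simpa [pvRowUpd_length] using h2
      rw [List.getElem_set, pvRowUpd_getElem prev cur t j hj]
      by_cases hjt : t = j
      · subst hjt
        rw [if_pos rfl, pvRowUpd_getD prev cur (t-1) t hlen,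
            if_neg (show ¬(1 ≤ t ∧ t ≤ t - 1) by omega),
            if_pos (show 1 ≤ t ∧ t ≤ t by omega)]
      · rw [if_neg hjt, pvRowUpd_getElem prev cur (t-1) j hj]
        congr 1
        simp only [eq_iff_iff]
        omega
  · have h1 : (pvRowUpd prev cur (t-1)).length ≤ t := by simp [pvRowUpd_length]; omega
    rw [List.set_eq_of_length_le h1]
    apply List.ext_getElem
    · simp [pvRowUpd_length]
    · intro j hj1 hj2
      have hj : j < cur.length := by simpa [pvRowUpd_length] using hj1
      rw [pvRowUpd_getElem prev cur (t-1) j hj, pvRowUpd_getElem prev cur t j hj]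
      congr 1
      simp only [eq_iff_iff]
      omega

theorem pv_getD_set_ne {α : Type} (l : List α) (i j : Nat) (v d : α) (h : i ≠ j) :
    (l.set i v).getD j d = l.getD j d := by
  simp [List.getD_eq_getElem?_getD, List.getElem?_set_ne h]

theorem pv_getD_set_self {α : Type} (l : List α) (i : Nat) (v d : α) (h : i < l.length) :
    (l.set i v).getD i d = v := by
  simp [List.getD_eq_getElem?_getD, h]

theorem pvStepA_set (bs : List (List Int)) (i t : Nat) (hi : 1 ≤ i) (hlt : i < bs.length)
    (ht : 1 ≤ t) :
    pvStepA (bs.set i (pvRowUpd (bs.getD (i-1) []) (bs.getD i []) (t-1))) (i : Int) (t : Int)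
      = bs.set i (pvRowUpd (bs.getD (i-1) []) (bs.getD i []) t) := by
  unfold pvStepA
  have hi1 : ((i : Int) - 1) = ((i-1 : Nat) : Int) := by omega
  have ht1 : ((t : Int) - 1) = ((t-1 : Nat) : Int) := by omega
  rw [hi1, ht1]
  simp only [PySem.List.pyGetD_natCast, PySem.List.pySetD_natCast]
  rw [pv_getD_set_self _ _ _ _ (by simpa using hlt),
      pv_getD_set_ne _ _ _ _ _ (by omega), List.set_set]
  congr 1
  exact pvRowUpd_set _ _ t ht

theorem pvRowA_eq (bs : List (List Int)) (i t : Nat) (hi : 1 ≤ i) (hlt : i < bs.length) :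
    pvRowA bs (i : Int) (t : Int)
      = bs.set i (pvRowUpd (bs.getD (i-1) []) (bs.getD i []) (t-1)) := by
  induction t with
  | zero =>
      unfold pvRowA
      rw [PySem.List.pyRange_one_eq_nil (by omega)]
      simp [pvRowUpd_zero, List.set_getElem_self, List.getD_eq_getElem?_getD,
            List.getElem?_eq_getElem hlt]
  | succ t ih =>
      unfold pvRowA at ih ⊢
      by_cases ht0 : t = 0
      · subst ht0
        rw [PySem.List.pyRange_one_eq_nil (by norm_num)]
        simp [pvRowUpd_zero, List.set_getElem_self, List.getD_eq_getElem?_getD,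
              List.getElem?_eq_getElem hlt]
      · have hc : ((t+1 : Nat) : Int) = (t : Int) + 1 := by push_cast; ring
        rw [hc, PySem.List.pyRange_one_succ_right (by omega), List.foldl_append, ih]
        simp only [List.foldl_cons, List.foldl_nil]
        rw [pvStepA_set bs i t hi hlt (by omega)]
        simp

def pvG (grid : List (List Int)) (i j : Nat) : Int := (grid.getD i []).getD j 0
def pvS (grid : List (List Int)) (i j : Nat) : Int :=
  ((List.range (min i j + 1)).map (fun k => pvG grid (i-k) (j-k))).sum

theorem pvS_rec (grid : List (List Int)) (i j : Nat) (hi : 1 ≤ i) (hj : 1 ≤ j) :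
    pvS grid i j = pvG grid i j + pvS grid (i-1) (j-1) := by
  unfold pvS
  have hmin : min i j = min (i-1) (j-1) + 1 := by omega
  rw [hmin, List.range_succ_eq_map]
  simp only [List.map_cons, List.sum_cons, List.map_map, Nat.sub_zero]
  congr 1
  refine congrArg List.sum (List.map_congr_left ?_)
  intro k hk
  simp only [Function.comp_apply]
  congr 1 <;> omega

def pvStateAt (grid : List (List Int)) (t m n : Nat) : List (List Int) :=
  (List.range m).map (fun i => (List.range n).map (fun j =>
    if i < t then pvS grid i j else pvG grid i j))

theorem pvS_zero_left (grid : List (List Int)) (j : Nat) : pvS grid 0 j = pvG grid 0 j := by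
  simp [pvS]

theorem pvS_zero_right (grid : List (List Int)) (i : Nat) : pvS grid i 0 = pvG grid i 0 := by
  simp [pvS]

theorem pvStateAt_length (grid : List (List Int)) (t m n : Nat) :
    (pvStateAt grid t m n).length = m := by simp [pvStateAt]

theorem pvStateAt_getD (grid : List (List Int)) (t m n i : Nat) (hi : i < m) :
    (pvStateAt grid t m n).getD i []
      = (List.range n).map (fun j => if i < t then pvS grid i j else pvG grid i j) := by
  exact PySem.List.getD_map_range _ m i [] hi

theorem pvStateAt_succ_row (grid : List (List Int)) (t n : Nat) (ht : 1 ≤ t) :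
    pvRowUpd ((List.range n).map (fun j => pvS grid (t-1) j))
             ((List.range n).map (fun j => pvG grid t j)) (n-1)
      = (List.range n).map (fun j => pvS grid t j) := by
  apply List.ext_getElem
  · simp [pvRowUpd_length]
  · intro j h1 h2
    have hj : j < n := by simpa using h2
    rw [pvRowUpd_getElem _ _ _ j (by simpa using hj)]
    rw [PySem.List.getD_map_range _ n j 0 hj]
    simp only [List.getElem_map, List.getElem_range]
    split_ifs with hcond
    · rw [PySem.List.getD_map_range _ n (j-1) 0 (by omega)]
      rw [pvS_rec grid t j ht hcond.1]
    · have hj0 : j = 0 := by omega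
      subst hj0
      rw [pvS_zero_right]

theorem pvOuter_eq (grid : List (List Int)) (t : Nat) (ht : t ≤ grid.length) :
    (PySem.List.pyRange 1 (t : Int) 1).foldl
        (fun bs i => pvRowA bs i ((grid.getD 0 []).length : Int))
        (pvStateAt grid 0 grid.length (grid.getD 0 []).length)
      = pvStateAt grid t grid.length (grid.getD 0 []).length := by
  induction t with
  | zero => rw [PySem.List.pyRange_one_eq_nil (by norm_num)]; rfl
  | succ t ih =>
      by_cases ht0 : t = 0
      · subst ht0
        rw [PySem.List.pyRange_one_eq_nil (by norm_num)]
        simp only [List.foldl_nil]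
        unfold pvStateAt
        refine List.map_congr_left ?_
        intro i hi
        refine List.map_congr_left ?_
        intro j hj
        by_cases h0 : i = 0
        · subst h0
          rw [if_neg (by omega), if_pos (by omega), pvS_zero_left]
        · rw [if_neg (by omega), if_neg (by omega)]
      · have hc : ((t+1 : Nat) : Int) = (t : Int) + 1 := by push_cast; ring
        rw [hc, PySem.List.pyRange_one_succ_right (by omega), List.foldl_append,
            ih (by omega)]
        simp only [List.foldl_cons, List.foldl_nil]
        rw [pvRowA_eq _ t ((grid.getD 0 []).length) (by omega) (by rw [pvStateAt_length]; omega)]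
        rw [pvStateAt_getD grid t _ _ (t-1) (by omega), pvStateAt_getD grid t _ _ t (by omega)]
        have hprev : (List.range (grid.getD 0 []).length).map
            (fun j => if t-1 < t then pvS grid (t-1) j else pvG grid (t-1) j)
            = (List.range (grid.getD 0 []).length).map (fun j => pvS grid (t-1) j) := by
          refine List.map_congr_left ?_; intro j hj; rw [if_pos (by omega)]
        have hcur : (List.range (grid.getD 0 []).length).map
            (fun j => if t < t then pvS grid t j else pvG grid t j)
            = (List.range (grid.getD 0 []).length).map (fun j => pvG grid t j) := by
          refine List.map_congr_left ?_; intro j hj; rw [if_neg (by omega)]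
        rw [hprev, hcur, pvStateAt_succ_row grid t _ (by omega)]
        apply List.ext_getElem
        · simp [pvStateAt_length]
        · intro i h1 h2
          have him : i < grid.length := by simpa [pvStateAt_length] using h2
          rw [List.getElem_set]
          unfold pvStateAt
          simp only [List.getElem_map, List.getElem_range]
          by_cases hit : t = i
          · subst hit
            rw [if_pos rfl]
            refine List.map_congr_left ?_
            intro j hj
            rw [if_pos (by omega)]
          · rw [if_neg hit]
            refine List.map_congr_left ?_
            intro j hj
            congr 1
            simp only [eq_iff_iff]
            omega

theorem pvInit_eq (grid : List (List Int)) :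
    (PySem.List.pyRange 0 (grid.length : Int) 1).map (fun i =>
      (PySem.List.pyRange 0 ((grid.getD 0 []).length : Int) 1).map (fun j =>
        PySem.List.pyGetD (PySem.List.pyGetD grid i []) j 0))
      = pvStateAt grid 0 grid.length (grid.getD 0 []).length := by
  simp only [PySem.List.pyRange_zero_nat, List.map_map]
  unfold pvStateAt
  refine List.map_congr_left ?_
  intro i hi
  simp only [Function.comp_apply]
  refine List.map_congr_left ?_
  intro j hj
  simp only [Function.comp_apply, PySem.List.pyGetD_natCast]
  rw [if_neg (by omega)]
  rfl

theorem pvA_eq (grid : List (List Int)) :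
    getBottomRight grid = pvStateAt grid grid.length grid.length (grid.getD 0 []).length := by
  unfold getBottomRight
  simp only [PySem.List.pyGetD_zero]
  rw [pvInit_eq]
  exact pvOuter_eq grid grid.length (le_refl _)

theorem pvB_eq (grid : List (List Int)) :
    getBottomRight_alt grid
      = (List.range grid.length).map (fun i =>
          (List.range (grid.getD 0 []).length).map (fun j => pvS grid i j)) := by
  unfold getBottomRight_alt
  simp only [PySem.List.pyGetD_zero, PySem.List.pyRange_zero_nat, List.map_map]
  refine List.map_congr_left ?_
  intro i hi
  simp only [Function.comp_apply]
  refine List.map_congr_left ?_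
  intro j hj
  simp only [Function.comp_apply]
  have hmin : (min (i:Int) (j:Int) + 1) = ((min i j + 1 : Nat) : Int) := by push_cast; omega
  rw [hmin, PySem.List.pyRange_zero_nat]
  rw [List.foldl_map]
  unfold pvS
  rw [List.sum_eq_foldl, List.foldl_map]
  apply PySem.List.foldl_congr_mem
  intro acc k hk
  have hki : (↑i - ↑k : Int) = ((i - k : Nat) : Int) := by
    have := List.mem_range.mp hk; omega
  have hkj : (↑j - ↑k : Int) = ((j - k : Nat) : Int) := by
    have := List.mem_range.mp hk; omega
  rw [hki, hkj, PySem.List.pyGetD_natCast, PySem.List.pyGetD_natCast]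
  rfl

theorem pv_ports_eq (grid : List (List Int)) :
    getBottomRight grid = getBottomRight_alt grid := by
  rw [pvA_eq, pvB_eq]
  unfold pvStateAt
  refine List.map_congr_left ?_
  intro i hi
  refine List.map_congr_left ?_
  intro j hj
  rw [if_pos (List.mem_range.mp hi)]

-- ===== VERDICT (by name: the statement is the Claim_ definition above) =====
theorem getBottomRight_spec : Claim_equal_getBottomRight := by
  intro grid _ _
  unfold Spec_getBottomRight
  exact pv_ports_eq grid
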